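-- pv_equiv track=rewrite | github.com/PeteSong/demos | python-demos/algorithms_learning/binary_tree.py | arrays_equal
-- ===== SOURCE A (Python) =====
-- import copy
-- from typing import Any, Optional, Self
--
-- def arrays_equal(a1: list[Any], a2: list[Any]) -> bool:
--     if a1 == a2:
--         return True
--     if a1 is None or a2 is None:
--         return False
--     a1_copy = copy.deepcopy(a1)
--     a2_copy = copy.deepcopy(a2)
--     while a1_copy and a1_copy[-1] is None:
--         a1_copy.pop()
--     while a2_copy and a2_copy[-1] is None:
--         a2_copy.pop()
--     return a1_copy == a2_copy
-- ===== SOURCE B (Python) =====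
-- from itertools import zip_longest
--
-- def arrays_equal(a1, a2):
--     if a1 is None or a2 is None:
--         return a1 is a2
--     return all(x is y or x == y for x, y in zip_longest(a1, a2, fillvalue=None))
-- ===== Notes on version B (the rewrite author's own statement) =====
-- stated objective: idiomatic
-- what changed: Replaces deep-copying both lists and popping trailing Nones with a single forward zip_longest pass that pads the shorter list with None and compares element-wise.
import Mathlib
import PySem

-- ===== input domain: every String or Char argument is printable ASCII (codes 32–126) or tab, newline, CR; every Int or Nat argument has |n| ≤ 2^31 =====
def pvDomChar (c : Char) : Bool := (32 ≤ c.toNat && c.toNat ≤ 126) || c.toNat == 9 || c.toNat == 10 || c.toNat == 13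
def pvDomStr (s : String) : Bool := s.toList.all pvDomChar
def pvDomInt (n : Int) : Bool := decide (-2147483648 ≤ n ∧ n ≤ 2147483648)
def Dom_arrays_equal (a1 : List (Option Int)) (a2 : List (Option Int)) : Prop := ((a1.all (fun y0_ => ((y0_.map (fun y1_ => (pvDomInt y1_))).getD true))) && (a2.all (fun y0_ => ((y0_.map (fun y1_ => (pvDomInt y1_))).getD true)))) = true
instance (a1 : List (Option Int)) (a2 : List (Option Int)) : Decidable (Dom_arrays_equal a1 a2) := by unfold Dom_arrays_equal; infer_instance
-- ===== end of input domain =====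

-- B replaces A's deep-copy-and-pop-trailing-Nones with one forward padded pass (idiomatic, no copies).
-- Equivalence is about the return value; the typed arguments are lists, so A's `is None` branch is vacuous here.

-- ===== PORT A =====
-- the `while a_copy and a_copy[-1] is None: a_copy.pop()` loop, step for step
def popTrail (l : List (Option Int)) : List (Option Int) :=
  if h : l ≠ [] ∧ l.getLast? = some none then popTrail l.dropLast else l
termination_by l.length
decreasing_by
  have := List.length_pos_iff.mpr h.1
  simp [List.length_dropLast]; omega

def arrays_equal (a1 : List (Option Int)) (a2 : List (Option Int)) : Bool :=
  if a1 == a2 then true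
  else popTrail a1 == popTrail a2

-- ===== PORT B =====
-- all(x is y or x == y for x, y in zip_longest(a1, a2, fillvalue=None))
def eqPadded : List (Option Int) → List (Option Int) → Bool
  | [], [] => true
  | [], y :: ys => (y == none) && eqPadded [] ys
  | x :: xs, [] => (x == none) && eqPadded xs []
  | x :: xs, y :: ys => (x == y) && eqPadded xs ys

def arrays_equal_alt (a1 : List (Option Int)) (a2 : List (Option Int)) : Bool :=
  eqPadded a1 a2

-- ===== PRECONDITION & SPEC =====
def Spec_arrays_equal (a1 : List (Option Int)) (a2 : List (Option Int)) (out : Bool) : Prop := out = arrays_equal_alt a1 a2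
instance (a1 : List (Option Int)) (a2 : List (Option Int)) (out : Bool) : Decidable (Spec_arrays_equal a1 a2 out) := by unfold Spec_arrays_equal; infer_instance

-- ===== CLAIM (what is proved, stated in full; the proofs are below) =====
def Claim_equal_arrays_equal : Prop := ∀ (a1 : List (Option Int)) (a2 : List (Option Int)), Dom_arrays_equal a1 a2 → Spec_arrays_equal a1 a2 (arrays_equal a1 a2)

-- ===== LEMMAS AND PROOFS =====

-- a front-recursive characterisation of removing trailing Nones
def trimF : List (Option Int) → List (Option Int)
  | [] => []
  | y :: ys => if trimF ys = [] ∧ y = none then [] else y :: trimF ys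

theorem popTrail_nil : popTrail [] = [] := by
  unfold popTrail; simp

theorem popTrail_append_none (xs : List (Option Int)) :
    popTrail (xs ++ [none]) = popTrail xs := by
  rw [popTrail]; simp

theorem popTrail_append_some (xs : List (Option Int)) (a : Int) :
    popTrail (xs ++ [some a]) = xs ++ [some a] := by
  rw [popTrail]; simp

theorem trimF_append_none (xs : List (Option Int)) :
    trimF (xs ++ [none]) = trimF xs := by
  induction xs with
  | nil => simp [trimF]
  | cons x xs ih => simp [trimF, ih]

theorem trimF_append_some (xs : List (Option Int)) (a : Int) :
    trimF (xs ++ [some a]) = xs ++ [some a] := by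
  induction xs with
  | nil => simp [trimF]
  | cons x xs ih => simp [trimF, ih]

theorem popTrail_eq_trimF (l : List (Option Int)) : popTrail l = trimF l := by
  induction l using List.reverseRecOn with
  | nil => simp [popTrail_nil, trimF]
  | append_singleton xs x ih =>
    cases x with
    | none => rw [popTrail_append_none, trimF_append_none, ih]
    | some a => rw [popTrail_append_some, trimF_append_some]

theorem eqPadded_eq (xs : List (Option Int)) : ∀ ys,
    eqPadded xs ys = (trimF xs == trimF ys) := by
  induction xs with
  | nil =>
    intro ys
    induction ys with
    | nil => simp [eqPadded, trimF]
    | cons y ys ih =>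
      simp only [eqPadded, ih, trimF]
      split_ifs with h
      · simp [h.1, h.2]
      · rcases Decidable.not_and_iff_or_not.mp h with h' | h' <;> simp_all
  | cons x xs ih =>
    intro ys
    cases ys with
    | nil =>
      have := ih []
      simp only [eqPadded, this, trimF]
      split_ifs with h
      · simp [h.1, h.2]
      · rcases Decidable.not_and_iff_or_not.mp h with h' | h' <;> simp_all
    | cons y ys =>
      simp only [eqPadded, ih ys]
      show _ = (trimF (x :: xs) == trimF (y :: ys))
      simp only [trimF]
      split_ifs with h1 h2 h2
      · simp [h1.1, h1.2, h2.1, h2.2]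
      · rcases Decidable.not_and_iff_or_not.mp h2 with h' | h' <;> simp_all <;>
          exact fun hy => absurd hy.symm h'
      · rcases Decidable.not_and_iff_or_not.mp h1 with h' | h' <;> simp_all
      · simp

-- ===== VERDICT (by name: the statement is the Claim_ definition above) =====
theorem arrays_equal_spec : Claim_equal_arrays_equal := by
  intro a1 a2 _
  unfold Spec_arrays_equal arrays_equal arrays_equal_alt
  rw [eqPadded_eq, popTrail_eq_trimF, popTrail_eq_trimF]
  split_ifs with h
  · simp_all
  · rfl
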